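-- pv_equiv track=rewrite | github.com/liviusighiartau/scoala-informala | python_homeworks/lists_homework3/replace_last_element_in_a_list.py | replace_last_element_in_list
-- ===== SOURCE A (Python) =====
-- def replace_last_element_in_list(my_list: list, replacer='last'):
--     my_list_updated = [
--         replacer
--         if index == len(my_list) - 1
--         else element
--         for index, element in enumerate(my_list)
--     ]
--     return my_list_updated
-- ===== SOURCE B (Python) =====
-- def replace_last_element_in_list(my_list: list, replacer='last'):
--     result = my_list[:]
--     if my_list:
--         result[-1] = replacer
--     return result
-- ===== Notes on version B (the rewrite author's own statement) =====
-- stated objective: simpler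
-- what changed: Replaced the per-element index-checking comprehension with a bulk slice copy plus a single assignment to the last slot (guarded for the empty list).
import Mathlib
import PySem

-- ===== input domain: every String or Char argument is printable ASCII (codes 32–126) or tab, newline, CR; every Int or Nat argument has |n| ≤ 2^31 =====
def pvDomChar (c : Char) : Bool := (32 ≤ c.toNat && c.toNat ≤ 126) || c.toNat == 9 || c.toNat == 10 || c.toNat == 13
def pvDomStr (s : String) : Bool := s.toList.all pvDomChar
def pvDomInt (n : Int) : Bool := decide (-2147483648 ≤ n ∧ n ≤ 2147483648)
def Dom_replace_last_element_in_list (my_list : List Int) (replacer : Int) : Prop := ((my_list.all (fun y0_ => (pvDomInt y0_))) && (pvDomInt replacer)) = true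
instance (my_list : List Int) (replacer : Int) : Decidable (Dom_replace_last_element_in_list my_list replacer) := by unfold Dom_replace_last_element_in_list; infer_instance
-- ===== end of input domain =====

-- ===== PORT A =====
-- A: list comprehension over enumerate, replacing the element whose index is len-1.
def replace_last_element_in_list (my_list : List Int) (replacer : Int) : List Int :=
  (PySem.List.enumerate my_list).map
    (fun p => if p.1 = (my_list.length : Int) - 1 then replacer else p.2)

-- ===== PORT B =====
-- B: bulk copy, then overwrite the last slot (result[-1] = replacer) if nonempty.
def replace_last_element_in_list_alt (my_list : List Int) (replacer : Int) : List Int :=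
  if my_list = [] then my_list else my_list.dropLast ++ [replacer]

-- ===== PRECONDITION & SPEC =====
def Spec_replace_last_element_in_list (my_list : List Int) (replacer : Int) (out : List Int) : Prop := out = replace_last_element_in_list_alt my_list replacer
instance (my_list : List Int) (replacer : Int) (out : List Int) : Decidable (Spec_replace_last_element_in_list my_list replacer out) := by unfold Spec_replace_last_element_in_list; infer_instance

-- ===== CLAIM (what is proved, stated in full; the proofs are below) =====
def Claim_equal_replace_last_element_in_list : Prop := ∀ (my_list : List Int) (replacer : Int), Dom_replace_last_element_in_list my_list replacer → Spec_replace_last_element_in_list my_list replacer (replace_last_element_in_list my_list replacer)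

-- ===== LEMMAS AND PROOFS =====

-- ===== VERDICT (by name: the statement is the Claim_ definition above) =====
-- A's comprehension, started at any index s, equals dropLast ++ [r] when offsets line up.
theorem pv_enum_lemma (xs : List Int) (r L : Int) (s : Int) (h : s + xs.length = L + 1) :
    (PySem.List.enumerate xs s).map (fun p => if p.1 = L then r else p.2)
      = if xs = [] then [] else xs.dropLast ++ [r] := by
  induction xs generalizing s with
  | nil => simp [PySem.List.enumerate_nil]
  | cons x xs ih =>
    simp only [PySem.List.enumerate_cons, List.map_cons]
    rcases xs with _ | ⟨y, ys⟩
    · simp at h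
      simp [h]
    · simp only [List.length_cons, Nat.cast_add, Nat.cast_one] at h
      have h' : (s + 1) + ((y :: ys).length : Int) = L + 1 := by
        simp only [List.length_cons]; push_cast; omega
      have hs : s ≠ L := by omega
      rw [ih (s+1) h']
      simp [hs]

theorem replace_last_element_in_list_spec : Claim_equal_replace_last_element_in_list := by
  intro my_list replacer _
  unfold Spec_replace_last_element_in_list replace_last_element_in_list replace_last_element_in_list_alt
  rw [pv_enum_lemma my_list replacer ((my_list.length : Int) - 1) 0 (by omega)]
  split <;> simp_all
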